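-- pv_equiv track=rewrite | github.com/noakmilo/soscubamap | app/services/news_posts.py | clean_image_alts
-- ===== SOURCE A (Python) =====
-- def clean_image_alts(raw, count):
--     alts = []
--     for idx in range(count):
--         value = ""
--         if raw and idx < len(raw):
--             value = (raw[idx] or "").strip()
--         alts.append(value[:255])
--     return alts
-- ===== SOURCE B (Python) =====
-- def clean_image_alts(raw, count):
--     cnt = max(count, 0)
--     if raw:
--         n = min(len(raw), cnt)
--         cleaned = [(item or "").strip()[:255] for item in raw[:n]]
--     else:
--         cleaned = []
--     return cleaned + [""] * (cnt - len(cleaned))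
-- ===== Notes on version B (the rewrite author's own statement) =====
-- stated objective: simpler
-- what changed: Replaced the single index loop with a per-iteration truthiness/bounds guard by a two-phase structure: clean the existing prefix via a comprehension over raw[:n], then pad with [''] * remainder.
import Mathlib
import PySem

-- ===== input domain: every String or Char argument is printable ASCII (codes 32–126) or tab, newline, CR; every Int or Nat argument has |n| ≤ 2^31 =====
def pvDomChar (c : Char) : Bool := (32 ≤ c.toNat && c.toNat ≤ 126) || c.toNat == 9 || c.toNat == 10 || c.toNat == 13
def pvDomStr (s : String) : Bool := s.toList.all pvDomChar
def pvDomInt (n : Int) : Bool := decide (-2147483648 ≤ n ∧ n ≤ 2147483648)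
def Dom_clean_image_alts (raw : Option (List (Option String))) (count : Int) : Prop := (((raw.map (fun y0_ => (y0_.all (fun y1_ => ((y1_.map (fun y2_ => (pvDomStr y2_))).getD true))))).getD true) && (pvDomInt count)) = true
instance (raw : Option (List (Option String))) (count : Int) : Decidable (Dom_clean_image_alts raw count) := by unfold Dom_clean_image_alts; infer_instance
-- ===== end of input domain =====

-- B restates A's guarded index loop as: clean the existing prefix raw[:n] by a map, then pad
-- with empty strings up to max(count,0) — a different decomposition, same values (objective: simpler).

-- ===== PORT A =====
def clean_image_alts (raw : Option (List (Option String))) (count : Int) : List String :=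
  (PySem.List.pyRange 0 count 1).foldl (fun alts idx =>
    let l := raw.getD []
    let value : String :=
      if (!l.isEmpty) && decide (idx < (l.length : Int)) then
        PySem.Str.strip ((PySem.List.pyGetD l idx none).getD "")
      else ""
    alts ++ [PySem.Str.slice value none (some 255)]) []

-- ===== PORT B =====
def clean_image_alts_alt (raw : Option (List (Option String))) (count : Int) : List String :=
  let cnt := max count 0
  let cleaned : List String :=
    match raw with
    | none => []
    | some l =>
      if l.isEmpty then []
      else
        (PySem.List.slice l none (some (min (l.length : Int) cnt))).map
          (fun item => PySem.Str.slice (PySem.Str.strip (item.getD "")) none (some 255))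
  cleaned ++ List.replicate (cnt - (cleaned.length : Int)).toNat ""

-- ===== PRECONDITION & SPEC =====
def Spec_clean_image_alts (raw : Option (List (Option String))) (count : Int) (out : List String) : Prop := out = clean_image_alts_alt raw count
instance (raw : Option (List (Option String))) (count : Int) (out : List String) : Decidable (Spec_clean_image_alts raw count out) := by unfold Spec_clean_image_alts; infer_instance

-- ===== CLAIM (what is proved, stated in full; the proofs are below) =====
def Claim_equal_clean_image_alts : Prop := ∀ (raw : Option (List (Option String))) (count : Int), Dom_clean_image_alts raw count → Spec_clean_image_alts raw count (clean_image_alts raw count)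

-- ===== LEMMAS AND PROOFS =====

-- A's foldl that only appends one element per iteration is a map.
theorem foldl_append_singleton {α β : Type} (f : α → β) (l : List α) (init : List β) :
    l.foldl (fun acc i => acc ++ [f i]) init = init ++ l.map f := by
  induction l generalizing init with
  | nil => simp
  | cons x xs ih => simp [List.foldl, ih, List.append_assoc]

theorem slice_empty_255 : PySem.Str.slice "" none (some 255) = "" := rfl

-- the main case: raw = some l with l nonempty
theorem clean_main (l : List (Option String)) (count : Int) (hne : l.isEmpty = false) :
    (PySem.List.pyRange 0 count 1).map (fun idx =>
      PySem.Str.slice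
        (if ((!l.isEmpty) && decide (idx < (l.length : Int))) = true then
          PySem.Str.strip ((PySem.List.pyGetD l idx none).getD "")
        else "") none (some 255)) =
    ((PySem.List.slice l none (some (min (l.length : Int) (max count 0)))).map
      (fun item => PySem.Str.slice (PySem.Str.strip (item.getD "")) none (some 255))) ++
    List.replicate ((max count 0) -
      (((PySem.List.slice l none (some (min (l.length : Int) (max count 0)))).map
        (fun item => PySem.Str.slice (PySem.Str.strip (item.getD "")) none (some 255))).length : Int)).toNat "" := by
  have hLpos : 0 < (l.length : Int) := by
    cases l with
    | nil => simp at hne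
    | cons a as => simp
  set L : Int := (l.length : Int) with hL
  set h : Option String → String :=
    fun item => PySem.Str.slice (PySem.Str.strip (item.getD "")) none (some 255) with hh
  set m : Int := min L (max count 0) with hm
  have hm0 : 0 ≤ m := by omega
  have hmL : m ≤ L := by omega
  rw [PySem.List.slice_to l hm0]
  have hcl : ((l.take m.toNat).map h).length = m.toNat := by
    simp; omega
  rw [hcl]
  by_cases hc : count ≤ 0
  · rw [PySem.List.pyRange_one_eq_nil hc]
    have : m = 0 := by omega
    simp [this]
    all_goals omega
  · rw [Int.not_le] at hc
    have hmc : m ≤ count := by omega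
    rw [PySem.List.pyRange_one_append 0 m count hm0 hmc, List.map_append]
    congr 1
    · -- prefix: indices below m hit the list
      have htake : ∀ idx ∈ PySem.List.pyRange 0 m 1,
          (PySem.Str.slice
            (if ((!l.isEmpty) && decide (idx < L)) = true then
              PySem.Str.strip ((PySem.List.pyGetD l idx none).getD "")
            else "") none (some 255)) =
          h (PySem.List.pyGetD (l.take m.toNat) idx none) := by
        intro idx hidx
        rw [PySem.List.mem_pyRange_one] at hidx
        have hlt : idx < L := by omega
        rw [if_pos (by simp [hne]; exact hlt)]
        rw [hh]
        congr 2
        rw [PySem.List.pyGetD_eq_getElem l none hidx.1 (by omega),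
            PySem.List.pyGetD_eq_getElem (l.take m.toNat) none hidx.1 (by simp; omega)]
        simp
      rw [List.map_congr_left htake]
      have hlen : PySem.List.len (l.take m.toNat) = m := by
        simp [PySem.List.len_eq]; omega
      rw [show (fun idx => h (PySem.List.pyGetD (l.take m.toNat) idx none)) =
            h ∘ (fun idx => PySem.List.pyGetD (l.take m.toNat) idx none) from rfl,
          ← List.map_map,
          show PySem.List.pyRange 0 m 1 = PySem.List.pyRange 0 (PySem.List.len (l.take m.toNat)) 1
            from by rw [hlen],
          PySem.List.map_pyGetD_pyRange_zero]
    · -- suffix: indices from m on miss the list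
      have hmiss : ∀ idx ∈ PySem.List.pyRange m count 1,
          (PySem.Str.slice
            (if ((!l.isEmpty) && decide (idx < L)) = true then
              PySem.Str.strip ((PySem.List.pyGetD l idx none).getD "")
            else "") none (some 255)) = "" := by
        intro idx hidx
        rw [PySem.List.mem_pyRange_one] at hidx
        rw [if_neg (by simp; intro _; omega)]
        exact slice_empty_255
      rw [List.map_congr_left hmiss, List.map_const', PySem.List.length_pyRange_one]
      congr 1
      omega

theorem clean_image_alts_spec_aux (raw : Option (List (Option String))) (count : Int) :
    clean_image_alts raw count = clean_image_alts_alt raw count := by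
  unfold clean_image_alts clean_image_alts_alt
  rw [foldl_append_singleton]
  simp only [List.nil_append]
  match raw with
  | none =>
      simp only [Option.getD, List.isEmpty_nil, Bool.not_true, Bool.false_and, Bool.false_eq_true,
        if_false]
      rw [PySem.List.pyRange_one 0 count]
      simp only [List.map_map, Function.comp_def, slice_empty_255, List.map_const',
        List.length_range, List.nil_append, List.length_nil, Nat.cast_zero]
      congr 1
      omega
  | some [] =>
      rw [PySem.List.pyRange_one 0 count]
      simp [Function.comp_def, slice_empty_255, List.map_const']
      omega
  | some (a :: as) =>
      have hne : (a :: as).isEmpty = false := by simp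
      simp only [Option.getD, hne, Bool.not_false, Bool.false_eq_true, if_false]
      exact clean_main (a :: as) count hne

-- ===== VERDICT (by name: the statement is the Claim_ definition above) =====
theorem clean_image_alts_spec : Claim_equal_clean_image_alts := by
  intro raw count _
  exact clean_image_alts_spec_aux raw count
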